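-- pv_equiv track=rewrite | github.com/j0lm/finals-battle-pass-calc | calculator.py | calculate_total_xp
-- ===== SOURCE A (Python) =====
-- PHASE_1_TOTAL_XP = 1104000
--
-- PHASE_2_TOTAL_XP = 1354000
--
-- MIN_BP_LEVEL = 1
--
-- PHASE_1_MAX_BP_LEVEL = 96
--
-- PHASE_2_MAX_BP_LEVEL = 101
--
-- PHASE_3_MAX_BP_LEVEL = 106
--
-- MIN_XP = 0
--
-- PHASE_2_MAX_XP = 50000
--
-- PHASE_3_MAX_XP = 100000
--
-- PHASE_1_BASE_XP = 6000
--
-- PHASE_1_XP_DELTA = 1000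
--
-- PHASE_1_LEVELS_PER_PAGE = 8
--
-- def calculate_total_xp(current_level, current_xp_progress=0):
--     complete_levels = current_level - 1 # `current_level` is in progress
--     if complete_levels <= PHASE_1_MAX_BP_LEVEL:
--         current_total_xp = MIN_XP
--         for level in range(MIN_BP_LEVEL,current_level):
--             current_total_xp = current_total_xp + (int((level - 1) / PHASE_1_LEVELS_PER_PAGE) * PHASE_1_XP_DELTA) + PHASE_1_BASE_XP
--         return int(current_total_xp + current_xp_progress)
--     if complete_levels <= PHASE_2_MAX_BP_LEVEL:
--         return int(PHASE_1_TOTAL_XP + ((complete_levels - PHASE_1_MAX_BP_LEVEL) * PHASE_2_MAX_XP) + current_xp_progress)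
--     if complete_levels <= PHASE_3_MAX_BP_LEVEL:
--         return int(PHASE_2_TOTAL_XP + ((complete_levels - PHASE_2_MAX_BP_LEVEL) * PHASE_3_MAX_XP) + current_xp_progress)
-- ===== SOURCE B (Python) =====
-- def calculate_total_xp(current_level, current_xp_progress=0):
--     n = current_level - 1  # completed levels
--     if n <= 96:
--         if n <= 0:
--             return int(current_xp_progress)
--         q, r = n // 8, n % 8
--         # sum_{k=0}^{n-1} (k // 8) = 8*q*(q-1)//2 + r*q  (pages of 8 levels)
--         return int(6000 * n + 1000 * ((8 * q * (q - 1)) // 2 + r * q) + current_xp_progress)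
--     if n <= 101:
--         return int(1104000 + (n - 96) * 50000 + current_xp_progress)
--     if n <= 106:
--         return int(1354000 + (n - 101) * 100000 + current_xp_progress)
-- ===== Notes on version B (the rewrite author's own statement) =====
-- stated objective: alternative
-- what changed: Replaced the phase-1 per-level loop with a closed-form arithmetic formula (6000*N plus 1000*(8*q*(q-1)//2 + r*q) with q,r = divmod(N,8)); the two later O(1) branches keep their structure.
-- outside the precondition, e.g. on calculate_total_xp(200, 0): A returns None, B returns None
import Mathlib
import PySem

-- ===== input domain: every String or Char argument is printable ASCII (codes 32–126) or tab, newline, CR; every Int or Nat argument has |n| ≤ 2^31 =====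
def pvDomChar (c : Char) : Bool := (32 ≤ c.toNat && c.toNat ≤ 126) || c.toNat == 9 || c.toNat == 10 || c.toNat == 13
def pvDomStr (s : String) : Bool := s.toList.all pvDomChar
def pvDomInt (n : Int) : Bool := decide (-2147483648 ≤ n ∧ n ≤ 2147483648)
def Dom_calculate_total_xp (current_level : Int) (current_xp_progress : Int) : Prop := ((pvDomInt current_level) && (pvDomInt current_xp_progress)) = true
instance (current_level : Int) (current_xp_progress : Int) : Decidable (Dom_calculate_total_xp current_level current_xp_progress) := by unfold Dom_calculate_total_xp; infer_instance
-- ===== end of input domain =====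

-- B replaces A's phase-1 per-level loop with a closed-form arithmetic formula (alternative algorithm; the loop is bounded, so no measurable speed difference).

-- ===== PORT A =====
-- Literal port of A. `int((level - 1) / 8)` (float division then int()) is PySem.Int.truncdiv,
-- exact on the domain's magnitudes. The final fall-through, where the Python returns None
-- (no Int), is excluded by Pre_; the port returns 0 there.
def calculate_total_xp (current_level : Int) (current_xp_progress : Int) : Int :=
  let complete_levels := current_level - 1
  if complete_levels ≤ 96 then
    let current_total_xp :=
      (PySem.List.pyRange 1 current_level 1).foldl
        (fun acc level => acc + PySem.Int.truncdiv (level - 1) 8 * 1000 + 6000) 0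
    current_total_xp + current_xp_progress
  else if complete_levels ≤ 101 then
    1104000 + (complete_levels - 96) * 50000 + current_xp_progress
  else if complete_levels ≤ 106 then
    1354000 + (complete_levels - 101) * 100000 + current_xp_progress
  else 0

-- ===== PORT B =====
def calculate_total_xp_alt (current_level : Int) (current_xp_progress : Int) : Int :=
  let n := current_level - 1
  if n ≤ 96 then
    if n ≤ 0 then current_xp_progress
    else
      let q := PySem.Int.floordiv n 8
      let r := PySem.Int.mod n 8
      6000 * n + 1000 * (PySem.Int.floordiv (8 * q * (q - 1)) 2 + r * q) + current_xp_progress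
  else if n ≤ 101 then
    1104000 + (n - 96) * 50000 + current_xp_progress
  else if n ≤ 106 then
    1354000 + (n - 101) * 100000 + current_xp_progress
  else 0

-- ===== PRECONDITION & SPEC =====
-- Pre_ excludes current_level > 107, where A falls through all branches and returns None (no int).
def Pre_calculate_total_xp (current_level : Int) (current_xp_progress : Int) : Prop :=
  current_level ≤ 107
instance (current_level : Int) (current_xp_progress : Int) : Decidable (Pre_calculate_total_xp current_level current_xp_progress) := by unfold Pre_calculate_total_xp; infer_instance
def pvWitness_calculate_total_xp : Int × Int := (42, 1234)

def Spec_calculate_total_xp (current_level : Int) (current_xp_progress : Int) (out : Int) : Prop := out = calculate_total_xp_alt current_level current_xp_progress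
instance (current_level : Int) (current_xp_progress : Int) (out : Int) : Decidable (Spec_calculate_total_xp current_level current_xp_progress out) := by unfold Spec_calculate_total_xp; infer_instance

-- ===== CLAIM (what is proved, stated in full; the proofs are below) =====
def Claim_equal_calculate_total_xp : Prop := ∀ (current_level : Int) (current_xp_progress : Int), Dom_calculate_total_xp current_level current_xp_progress → Pre_calculate_total_xp current_level current_xp_progress → Spec_calculate_total_xp current_level current_xp_progress (calculate_total_xp current_level current_xp_progress)

-- ===== LEMMAS AND PROOFS =====

-- A's phase-1 loop, summed over 1..n levels, equals B's closed form.
lemma loop_closed_form (n : Nat) (a : Int) :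
    (PySem.List.pyRange 1 ((n : Int) + 1) 1).foldl
        (fun acc level => acc + PySem.Int.truncdiv (level - 1) 8 * 1000 + 6000) a
      = a + 6000 * (n : Int) + 1000 * (4 * ((n : Int) / 8) * ((n : Int) / 8 - 1) + ((n : Int) % 8) * ((n : Int) / 8)) := by
  induction n generalizing a with
  | zero =>
      rw [PySem.List.pyRange_one_eq_nil (by norm_num)]
      simp
  | succ m ih =>
      rw [show ((m + 1 : Nat) : Int) + 1 = ((m : Int) + 1) + 1 by push_cast; ring,
        PySem.List.pyRange_one_succ_right (by omega)]
      rw [List.foldl_append, ih]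
      simp only [List.foldl_cons, List.foldl_nil]
      have htd : PySem.Int.truncdiv ((m : Int) + 1 - 1) 8 = (m : Int) / 8 := by
        simp [PySem.Int.truncdiv]
      rw [htd]
      set q : Int := (m : Int) / 8 with hq
      set r : Int := (m : Int) % 8 with hr
      have hm : (m : Int) = 8 * q + r := by omega
      have hrb : 0 ≤ r ∧ r < 8 := by omega
      by_cases h7 : r = 7
      · have hq' : ((m : Int) + 1) / 8 = q + 1 := by omega
        have hr' : ((m : Int) + 1) % 8 = 0 := by omega
        rw [show ((m + 1 : Nat) : Int) = (m : Int) + 1 by push_cast; ring, hq', hr', hm, h7]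
        ring
      · have hq' : ((m : Int) + 1) / 8 = q := by omega
        have hr' : ((m : Int) + 1) % 8 = r + 1 := by omega
        rw [show ((m + 1 : Nat) : Int) = (m : Int) + 1 by push_cast; ring, hq', hr', hm]
        ring

-- ===== VERDICT (by name: the statement is the Claim_ definition above) =====
theorem calculate_total_xp_spec : Claim_equal_calculate_total_xp := by
  intro cl xp _ _
  unfold Spec_calculate_total_xp calculate_total_xp calculate_total_xp_alt
  by_cases h1 : cl - 1 ≤ 96
  · simp only [h1, if_pos]
    by_cases h0 : cl - 1 ≤ 0
    · rw [if_pos h0, PySem.List.pyRange_one_eq_nil (by omega)]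
      simp
    · rw [if_neg h0]
      obtain ⟨m, hm⟩ : ∃ m : Nat, cl = (m : Int) + 1 := ⟨(cl - 1).toNat, by omega⟩
      subst hm
      rw [loop_closed_form, show ((m : Int) + 1 - 1) = (m : Int) from by ring]
      have hfd : PySem.Int.floordiv (m : Int) 8 = (m : Int) / 8 :=
        PySem.Int.floordiv_eq_ediv_of_pos (show (0:Int) < 8 by norm_num)
      have hmd : PySem.Int.mod (m : Int) 8 = (m : Int) % 8 :=
        PySem.Int.mod_eq_emod_of_pos (show (0:Int) < 8 by norm_num)
      have hev : PySem.Int.floordiv (8 * ((m : Int) / 8) * ((m : Int) / 8 - 1)) 2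
          = 4 * ((m : Int) / 8) * ((m : Int) / 8 - 1) := by
        rw [PySem.Int.floordiv_eq_ediv_of_pos (by norm_num),
          show (8 : Int) * ((m : Int) / 8) * ((m : Int) / 8 - 1)
            = 2 * (4 * ((m : Int) / 8) * ((m : Int) / 8 - 1)) by ring,
          Int.mul_ediv_cancel_left _ (by norm_num)]
      simp only [hfd, hmd, hev]
      ring
  · simp only [h1, if_neg, not_false_iff]
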